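-- pv_equiv track=rewrite | github.com/Manik0107/VATA | script_generator.py | _enhance_visual_cues
-- ===== SOURCE A (Python) =====
-- def _enhance_visual_cues(script: str) -> str:
--     """Enhance visual cues throughout the script"""
--     # Replace basic cues with enhanced versions
--     replacements = {
--         '[SHOW': '[DISPLAY_VISUAL:',
--         '[GRAPH': '[ANIMATE_GRAPH:',
--         '[FORMULA': '[BUILD_FORMULA:',
--         '[DIAGRAM': '[CREATE_DIAGRAM:',
--         '[EXAMPLE': '[DEMONSTRATE_EXAMPLE:'
--     }
--
--     enhanced = script
--     for old, new in replacements.items():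
--         enhanced = enhanced.replace(old, new)
--
--     return enhanced
-- ===== SOURCE B (Python) =====
-- def _enhance_visual_cues(script: str) -> str:
--     """Enhance visual cues in one left-to-right pass instead of five sequential full-string replaces."""
--     replacements = [
--         ('[SHOW', '[DISPLAY_VISUAL:'),
--         ('[GRAPH', '[ANIMATE_GRAPH:'),
--         ('[FORMULA', '[BUILD_FORMULA:'),
--         ('[DIAGRAM', '[CREATE_DIAGRAM:'),
--         ('[EXAMPLE', '[DEMONSTRATE_EXAMPLE:'),
--     ]
--     out = []
--     i = 0
--     n = len(script)
--     while i < n: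
--         for old, new in replacements:
--             if script.startswith(old, i):
--                 out.append(new)
--                 i += len(old)
--                 break
--         else:
--             out.append(script[i])
--             i += 1
--     return ''.join(out)
-- ===== Notes on version B (the rewrite author's own statement) =====
-- stated objective: alternative
-- what changed: A runs five sequential full-string str.replace passes (one per marker); B makes a single left-to-right scan that at each position tries the five markers in order, emits the replacement and skips the marker on a match, otherwise copies one character.
import Mathlib
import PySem

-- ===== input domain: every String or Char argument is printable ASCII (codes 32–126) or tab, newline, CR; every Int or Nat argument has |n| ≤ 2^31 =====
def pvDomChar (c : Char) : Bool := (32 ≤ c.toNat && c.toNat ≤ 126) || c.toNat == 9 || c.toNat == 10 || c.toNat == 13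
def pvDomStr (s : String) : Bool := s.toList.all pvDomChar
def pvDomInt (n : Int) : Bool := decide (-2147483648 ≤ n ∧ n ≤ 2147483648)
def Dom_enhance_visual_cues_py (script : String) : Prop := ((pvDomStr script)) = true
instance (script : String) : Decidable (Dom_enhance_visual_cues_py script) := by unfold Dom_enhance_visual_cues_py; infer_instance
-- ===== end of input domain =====

-- B replaces A's five sequential full-string `.replace` passes by one left-to-right scan
-- that tries the five markers at each position (objective: alternative single-pass algorithm).

-- ===== PORT A =====
-- the dict literal `replacements`
def pvReplacements : PySem.Dict String String :=
  PySem.Dict.ofList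
    [("[SHOW", "[DISPLAY_VISUAL:"),
     ("[GRAPH", "[ANIMATE_GRAPH:"),
     ("[FORMULA", "[BUILD_FORMULA:"),
     ("[DIAGRAM", "[CREATE_DIAGRAM:"),
     ("[EXAMPLE", "[DEMONSTRATE_EXAMPLE:")]

-- `enhanced = script; for old, new in replacements.items(): enhanced = enhanced.replace(old, new)`
def enhance_visual_cues_py (script : String) : String :=
  pvReplacements.items.foldl (fun enhanced p => PySem.Str.replace enhanced p.1 p.2) script

-- ===== PORT B =====
-- Source B's `replacements` list of pairs, on char lists
def pvPairs : List (List Char × List Char) :=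
  [("[SHOW".toList, "[DISPLAY_VISUAL:".toList),
   ("[GRAPH".toList, "[ANIMATE_GRAPH:".toList),
   ("[FORMULA".toList, "[BUILD_FORMULA:".toList),
   ("[DIAGRAM".toList, "[CREATE_DIAGRAM:".toList),
   ("[EXAMPLE".toList, "[DEMONSTRATE_EXAMPLE:".toList)]

-- Source B's while-loop over positions: at each position try the pairs in order
-- (`for … break / else` = List.find?); on a match emit `new` and skip `old`, else copy one char.
def pvScanL (ps : List (List Char × List Char)) : List Char → List Char
  | [] => []
  | c :: t =>
    match ps.find? (fun p => p.1.isPrefixOf (c :: t)) with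
    | some p => p.2 ++ pvScanL ps (t.drop (p.1.length - 1))
    | none => c :: pvScanL ps t
termination_by l => l.length
decreasing_by
  · simp only [List.length_cons]
    simp only [List.length_drop]
    omega
  · simp

def enhance_visual_cues_py_alt (script : String) : String :=
  String.ofList (pvScanL pvPairs script.toList)

-- ===== PRECONDITION & SPEC =====
def Spec_enhance_visual_cues_py (script : String) (out : String) : Prop := out = enhance_visual_cues_py_alt script
instance (script : String) (out : String) : Decidable (Spec_enhance_visual_cues_py script out) := by unfold Spec_enhance_visual_cues_py; infer_instance

-- ===== CLAIM (what is proved, stated in full; the proofs are below) =====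
def Claim_equal_enhance_visual_cues_py : Prop := ∀ (script : String), Dom_enhance_visual_cues_py script → Spec_enhance_visual_cues_py script (enhance_visual_cues_py script)

-- ===== LEMMAS AND PROOFS =====

-- clean structural form of Python's str.replace scan (for a nonempty pattern)
def pvRep1 (k r : List Char) : List Char → List Char
  | [] => []
  | c :: t => if k.isPrefixOf (c :: t) then r ++ pvRep1 k r (t.drop (k.length - 1)) else c :: pvRep1 k r t
termination_by l => l.length
decreasing_by
  · simp only [List.length_cons]
    simp only [List.length_drop]
    omega
  · simp

-- the marker shape: nonempty, starts with '[', no other '['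
def pvGood (cs : List Char) : Bool :=
  !cs.isEmpty && cs.head? == some '[' && cs.tail.all (fun c => c ≠ '[')

-- k and r disagree before r ends (so k is never a prefix of r ++ anything)
def pvDiv (k r : List Char) : Bool := !(k.take r.length).isPrefixOf r

theorem pvDiv_not_prefix (k r x : List Char) (h : pvDiv k r = true) : ¬ k <+: (r ++ x) := by
  intro hp
  have h1 : k.take r.length <+: (r ++ x).take r.length := hp.take r.length
  rw [List.take_append_of_le_length (le_refl _), List.take_length] at h1
  simp only [pvDiv, Bool.not_eq_eq_eq_not, Bool.not_true, ← Bool.not_eq_true,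
    List.isPrefixOf_iff_prefix] at h
  exact h h1

theorem pvGood_head {cs : List Char} (h : pvGood cs = true) : cs.head? = some '[' := by
  simp [pvGood] at h
  exact h.1.2

theorem pvGood_tail {cs : List Char} (h : pvGood cs = true) : ∀ c ∈ cs.tail, c ≠ '[' := by
  simp [pvGood] at h
  exact h.2

-- head mismatch with '[' kills a prefix
theorem pvNotPrefix_of_head (k : List Char) (hk : k.head? = some '[')
    (c : Char) (hc : c ≠ '[') (x : List Char) : ¬ k <+: (c :: x) := by
  intro hp
  cases k with
  | nil => simp at hk
  | cons a t =>
    simp only [List.head?_cons, Option.some.injEq] at hk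
    rcases List.cons_prefix_cons.mp hp with ⟨h1, _⟩
    exact hc (h1 ▸ hk ▸ rfl)

-- pvRep1 walks over a '['-free block unchanged
theorem pvRep1_free (k r : List Char) (hk : k.head? = some '[') :
    ∀ (cs x : List Char), (∀ c ∈ cs, c ≠ '[') →
      pvRep1 k r (cs ++ x) = cs ++ pvRep1 k r x := by
  intro cs
  induction cs with
  | nil => intro x _; simp
  | cons c t ih =>
    intro x hfree
    have hnp : ¬ k.isPrefixOf (c :: (t ++ x)) = true := by
      rw [List.isPrefixOf_iff_prefix]
      exact pvNotPrefix_of_head k hk c (hfree c (by simp)) _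
    simp only [List.cons_append, pvRep1, if_neg hnp]
    rw [ih x (fun a ha => hfree a (by simp [ha]))]

-- pvRep1 walks over a whole replacement block unchanged
theorem pvRep1_over_rep (k r rj x : List Char) (hk : k.head? = some '[')
    (hrj : pvGood rj = true) (hd : pvDiv k rj = true) :
    pvRep1 k r (rj ++ x) = rj ++ pvRep1 k r x := by
  cases rj with
  | nil => simp
  | cons c t =>
    have hnp : ¬ k.isPrefixOf (c :: (t ++ x)) = true := by
      rw [List.isPrefixOf_iff_prefix]
      exact pvDiv_not_prefix k (c :: t) x hd
    simp only [List.cons_append, pvRep1, if_neg hnp]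
    rw [pvRep1_free k r hk t x (pvGood_tail hrj)]

-- pvRep1 fires on an exact occurrence of its key
theorem pvRep1_self (k r y : List Char) (hk : k ≠ []) :
    pvRep1 k r (k ++ y) = r ++ pvRep1 k r y := by
  cases k with
  | nil => exact absurd rfl hk
  | cons a t =>
    have hp : (a :: t).isPrefixOf (a :: (t ++ y)) = true := by
      rw [List.isPrefixOf_iff_prefix]
      exact ⟨y, by simp⟩
    simp only [List.cons_append, pvRep1, if_pos hp, List.length_cons, Nat.add_sub_cancel]
    rw [List.drop_left' rfl]

theorem pvScanL_nil_ps : ∀ l, pvScanL [] l = l := by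
  intro l
  induction l with
  | nil => simp [pvScanL]
  | cons c t ih => simp [pvScanL, ih]

-- a '['-free prefix of the scan output is a prefix of the input
theorem pvScanL_free_prefix (ps : List (List Char × List Char))
    (hps : ∀ p ∈ ps, p.2.head? = some '[') :
    ∀ (n : Nat) (t : List Char), t.length ≤ n →
      ∀ u, u <+: pvScanL ps t → (∀ c ∈ u, c ≠ '[') → u <+: t := by
  intro n
  induction n with
  | zero =>
    intro t ht u hu _
    have h0 : t = [] := List.length_eq_zero_iff.mp (Nat.le_zero.mp ht)
    subst h0
    simpa [pvScanL] using hu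
  | succ n ih =>
    intro t ht u hu hfree
    cases t with
    | nil => simpa [pvScanL] using hu
    | cons c t' =>
      cases hf : (ps.find? (fun p => p.1.isPrefixOf (c :: t'))) with
      | some p =>
        have hstep : pvScanL ps (c :: t') = p.2 ++ pvScanL ps (t'.drop (p.1.length - 1)) := by
          rw [pvScanL, hf]
        rw [hstep] at hu
        cases u with
        | nil => simp
        | cons a u' =>
          have hp2 : p.2.head? = some '[' := hps p (List.mem_of_find?_eq_some hf)
          cases hrep : p.2 with
          | nil => simp [hrep] at hp2
          | cons b rb =>
            rw [hrep] at hu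
            rcases List.cons_prefix_cons.mp (by simpa using hu) with ⟨hab, _⟩
            simp only [hrep, List.head?_cons, Option.some.injEq] at hp2
            exact absurd (hab ▸ hp2 ▸ rfl) (hfree a (by simp))
      | none =>
        have hstep : pvScanL ps (c :: t') = c :: pvScanL ps t' := by
          rw [pvScanL, hf]
        rw [hstep] at hu
        cases u with
        | nil => simp
        | cons a u' =>
          rcases List.cons_prefix_cons.mp hu with ⟨hac, hu'⟩
          have h1 : u' <+: t' := by
            apply ih t' (by simp only [List.length_cons] at ht; omega) u' hu'
            intro x hx
            exact hfree x (by simp [hx])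
          exact List.cons_prefix_cons.mpr ⟨hac, h1⟩

-- the scan copies a block at whose positions no key matches
theorem pvScanL_copy (ps : List (List Char × List Char)) :
    ∀ (m : Nat) (l : List Char), m ≤ l.length →
      (∀ j < m, ∀ pr ∈ ps, ¬ pr.1.isPrefixOf (l.drop j) = true) →
      pvScanL ps l = l.take m ++ pvScanL ps (l.drop m) := by
  intro m
  induction m with
  | zero => intro l _ _; simp
  | succ m ih =>
    intro l hm hnom
    cases l with
    | nil => simp at hm
    | cons c t =>
      have hnone : ps.find? (fun p => p.1.isPrefixOf (c :: t)) = none := by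
        rw [List.find?_eq_none]
        intro pr hpr
        simpa using hnom 0 (by omega) pr hpr
      rw [pvScanL, hnone]
      simp only [List.take_succ_cons, List.drop_succ_cons, List.cons_append, List.cons.injEq,
        true_and]
      apply ih t (by simp only [List.length_cons] at hm; omega)
      intro j hj pr hpr
      simpa using hnom (j + 1) (by omega) pr hpr

-- MAIN: appending one more (key, replacement) pair to the scan = running one more str.replace pass
theorem pvMain (k r : List Char) (ps : List (List Char × List Char))
    (hk : pvGood k = true)
    (hps : ∀ pr ∈ ps, pr.1.head? = some '[' ∧ pvGood pr.2 = true ∧ pvDiv k pr.2 = true) :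
    ∀ (n : Nat) (l : List Char), l.length ≤ n →
      pvRep1 k r (pvScanL ps l) = pvScanL (ps ++ [(k, r)]) l := by
  have hkne : k ≠ [] := by
    intro h
    rw [h] at hk
    simp [pvGood] at hk
  intro n
  induction n with
  | zero =>
    intro l hl
    have h0 : l = [] := List.length_eq_zero_iff.mp (Nat.le_zero.mp hl)
    subst h0
    simp [pvScanL, pvRep1]
  | succ n ih =>
    intro l hl
    cases l with
    | nil => simp [pvScanL, pvRep1]
    | cons c t =>
      cases hf : (ps.find? (fun p => p.1.isPrefixOf (c :: t))) with
      | some pr =>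
        rcases hps pr (List.mem_of_find?_eq_some hf) with ⟨_, hg2, hdiv⟩
        rw [pvScanL, hf]
        rw [pvRep1_over_rep k r pr.2 _ (pvGood_head hk) hg2 hdiv]
        rw [ih (t.drop (pr.1.length - 1))
          (by simp only [List.length_drop, List.length_cons] at *; omega)]
        conv_rhs => rw [pvScanL]
        rw [List.find?_append, hf, Option.some_or]
      | none =>
        have hLHS : pvScanL ps (c :: t) = c :: pvScanL ps t := by rw [pvScanL, hf]
        by_cases hkp : k <+: (c :: t)
        · -- the new key fires here
          have hcopy : pvScanL ps (c :: t) =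
              (c :: t).take k.length ++ pvScanL ps ((c :: t).drop k.length) := by
            apply pvScanL_copy ps k.length (c :: t) hkp.length_le
            intro j hj pr hpr
            cases j with
            | zero =>
              simpa using (List.find?_eq_none.mp hf) pr hpr
            | succ j =>
              rcases hkp with ⟨w, hw⟩
              rw [← hw, List.drop_append_of_le_length (by omega)]
              have hdk : k.drop (j + 1) ≠ [] := by
                intro h
                have := List.drop_eq_nil_iff.mp h
                omega
              cases hd : k.drop (j + 1) with
              | nil => exact absurd hd hdk
              | cons a t2 =>
                rw [List.cons_append, List.isPrefixOf_iff_prefix]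
                apply pvNotPrefix_of_head pr.1 (hps pr hpr).1 a _ _
                have ha : a ∈ k.tail := by
                  have : a ∈ k.drop (j + 1) := by simp [hd]
                  have h1 : k.drop (j + 1) = k.tail.drop j := by
                    cases k with
                    | nil => simp at hkne
                    | cons b tb => simp
                  exact List.mem_of_mem_drop (h1 ▸ this)
                exact pvGood_tail hk a ha
          have htake : (c :: t).take k.length = k :=
            (List.prefix_iff_eq_take.mp hkp).symm
          rw [hcopy, htake, pvRep1_self k r _ hkne]
          rw [ih ((c :: t).drop k.length)
            (by have h1 : 1 ≤ k.length := by
                  cases k with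
                  | nil => exact absurd rfl hkne
                  | cons _ _ => simp
                simp only [List.length_cons, List.length_drop] at *
                omega)]
          conv_rhs => rw [pvScanL]
          rw [List.find?_append, hf, Option.none_or]
          have hb : k.isPrefixOf (c :: t) = true := List.isPrefixOf_iff_prefix.mpr hkp
          have hfind : List.find? (fun p => p.1.isPrefixOf (c :: t)) [(k, r)] = some (k, r) := by
            simp [List.find?, hb]
          rw [hfind]
          have hdrop : t.drop (k.length - 1) = (c :: t).drop k.length := by
            cases k with
            | nil => exact absurd rfl hkne
            | cons _ _ => simp
          change r ++ pvScanL (ps ++ [(k, r)]) (List.drop k.length (c :: t)) =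
            r ++ pvScanL (ps ++ [(k, r)]) (t.drop (k.length - 1))
          rw [hdrop]
        · -- the new key does not fire here either
          have hnp2 : ¬ k.isPrefixOf (c :: pvScanL ps t) = true := by
            rw [List.isPrefixOf_iff_prefix]
            intro hp
            cases k with
            | nil => exact absurd rfl hkne
            | cons a k' =>
              rcases List.cons_prefix_cons.mp hp with ⟨hac, hk'⟩
              have ha : a = '[' := by
                have := pvGood_head hk
                simpa using this
              have hk't : k' <+: t := by
                apply pvScanL_free_prefix ps (fun p hp => pvGood_head (hps p hp).2.1)
                  t.length t (le_refl _) k' hk'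
                exact pvGood_tail hk
              exact hkp (List.cons_prefix_cons.mpr ⟨hac, hk't⟩)
          rw [hLHS, pvRep1, if_neg hnp2]
          rw [ih t (by simp only [List.length_cons] at hl; omega)]
          conv_rhs => rw [pvScanL]
          rw [List.find?_append, hf, Option.none_or]
          have hb : k.isPrefixOf (c :: t) = false := by
            rw [← Bool.not_eq_true, List.isPrefixOf_iff_prefix]
            exact hkp
          have hfind : List.find? (fun p => p.1.isPrefixOf (c :: t)) [(k, r)] = none := by
            simp [List.find?, hb]
          rw [hfind]

-- Python's str.replace (fueled scan) equals the structural scan pvRep1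
theorem pvGo_eq (k r : List Char) (hk : k ≠ []) :
    ∀ (fuel : Nat) (l acc : List Char), l.length ≤ fuel →
      PySem.Chars.replace.go k r fuel l acc = acc.reverse ++ pvRep1 k r l := by
  intro fuel
  induction fuel with
  | zero =>
    intro l acc hl
    have h0 : l = [] := List.length_eq_zero_iff.mp (Nat.le_zero.mp hl)
    subst h0
    rw [PySem.Chars.replace.go]
    simp [pvRep1]
  | succ fuel ih =>
    intro l acc hl
    cases l with
    | nil =>
      rw [PySem.Chars.replace.go]
      simp [pvRep1]
      omega
    | cons c t =>
      rw [PySem.Chars.replace.go]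
      by_cases hp : k.isPrefixOf (c :: t) = true
      · rw [if_pos hp, pvRep1, if_pos hp]
        have hdrop : List.drop k.length (c :: t) = t.drop (k.length - 1) := by
          cases k with
          | nil => exact absurd rfl hk
          | cons _ _ => simp
        rw [hdrop, ih _ _ (by
          simp only [List.length_drop, List.length_cons] at *; omega)]
        simp
      · rw [if_neg hp, pvRep1, if_neg hp]
        rw [ih _ _ (by simp only [List.length_cons] at hl; omega)]
        simp

theorem pvReplace_eq (k r l : List Char) (hk : k ≠ []) :
    PySem.Chars.replace l k r = pvRep1 k r l := by
  rw [PySem.Chars.replace, if_neg (by simpa using hk)]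
  simpa using pvGo_eq k r hk l.length l [] (le_refl _)

-- the five sequential passes collapse into the single five-key scan
theorem pvChain (cs : List Char) :
    pvRep1 "[EXAMPLE".toList "[DEMONSTRATE_EXAMPLE:".toList
      (pvRep1 "[DIAGRAM".toList "[CREATE_DIAGRAM:".toList
        (pvRep1 "[FORMULA".toList "[BUILD_FORMULA:".toList
          (pvRep1 "[GRAPH".toList "[ANIMATE_GRAPH:".toList
            (pvRep1 "[SHOW".toList "[DISPLAY_VISUAL:".toList cs)))) = pvScanL pvPairs cs := by
  have h1 : pvRep1 "[SHOW".toList "[DISPLAY_VISUAL:".toList cs =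
      pvScanL [("[SHOW".toList, "[DISPLAY_VISUAL:".toList)] cs := by
    have := pvMain "[SHOW".toList "[DISPLAY_VISUAL:".toList [] (by decide) (by decide)
      cs.length cs (le_refl _)
    rwa [pvScanL_nil_ps] at this
  rw [h1]
  rw [pvMain "[GRAPH".toList "[ANIMATE_GRAPH:".toList _ (by decide) (by decide)
    cs.length cs (le_refl _)]
  rw [pvMain "[FORMULA".toList "[BUILD_FORMULA:".toList _ (by decide) (by decide)
    cs.length cs (le_refl _)]
  rw [pvMain "[DIAGRAM".toList "[CREATE_DIAGRAM:".toList _ (by decide) (by decide)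
    cs.length cs (le_refl _)]
  rw [pvMain "[EXAMPLE".toList "[DEMONSTRATE_EXAMPLE:".toList _ (by decide) (by decide)
    cs.length cs (le_refl _)]
  rfl

-- ===== VERDICT (by name: the statement is the Claim_ definition above) =====
theorem enhance_visual_cues_py_spec : Claim_equal_enhance_visual_cues_py := by
  intro script _
  unfold Spec_enhance_visual_cues_py
  apply String.toList_injective
  have hitems : pvReplacements.items =
      [("[SHOW", "[DISPLAY_VISUAL:"),
       ("[GRAPH", "[ANIMATE_GRAPH:"),
       ("[FORMULA", "[BUILD_FORMULA:"),
       ("[DIAGRAM", "[CREATE_DIAGRAM:"),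
       ("[EXAMPLE", "[DEMONSTRATE_EXAMPLE:")] := by decide
  rw [enhance_visual_cues_py, hitems]
  simp only [List.foldl_cons, List.foldl_nil]
  simp only [PySem.Str.toList_replace]
  rw [pvReplace_eq _ _ _ (by decide), pvReplace_eq _ _ _ (by decide),
    pvReplace_eq _ _ _ (by decide), pvReplace_eq _ _ _ (by decide),
    pvReplace_eq _ _ _ (by decide)]
  rw [pvChain]
  simp [enhance_visual_cues_py_alt]
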